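-- pv_equiv track=rewrite | github.com/pypi-data/pypi-mirror-117 | packages/magnum-api/magnum-api-0.0.9.tar.gz/magnum-api-0.0.9/magnumapi/tool_adapters/roxie/RoxieInputBuilder.py | convert_flag_dct_to_str
-- ===== SOURCE A (Python) =====
-- def convert_flag_dct_to_str(flags):
--     COLUMN_WIDTH = 11
--     flag_per_line_count = 1
--     flag_str = '  '
--     for key, value in flags.items():
--         temp = "%s=%s" % (key, "T" if value else "F")
--         temp += (COLUMN_WIDTH - len(temp)) * ' '
--         if flag_per_line_count < 6:
--             flag_str += temp
--             flag_per_line_count += 1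
--         else:
--             flag_str += temp + "\n  "
--             flag_per_line_count = 1
--
--     flag_str += '\n  /'
--     return flag_str
-- ===== SOURCE B (Python) =====
-- def convert_flag_dct_to_str(flags):
--     # two-pass: build padded column strings first, then emit them in chunks of 6
--     pieces = []
--     for key, value in flags.items():
--         temp = "%s=%s" % (key, "T" if value else "F")
--         pieces.append(temp + (11 - len(temp)) * ' ')
--     out = '  '
--     for i in range(0, len(pieces), 6):
--         chunk = pieces[i:i + 6]
--         out += ''.join(chunk)
--         if len(chunk) == 6:
--             out += '\n  '
--     return out + '\n  /'
-- ===== Notes on version B (the rewrite author's own statement) =====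
-- stated objective: alternative
-- what changed: Replaces A's interleaved per-flag reset-counter loop by a two-pass build-then-chunk traversal: first a list of padded column strings, then a stride-6 loop joining each chunk and adding the line break only after full chunks.
import Mathlib
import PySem

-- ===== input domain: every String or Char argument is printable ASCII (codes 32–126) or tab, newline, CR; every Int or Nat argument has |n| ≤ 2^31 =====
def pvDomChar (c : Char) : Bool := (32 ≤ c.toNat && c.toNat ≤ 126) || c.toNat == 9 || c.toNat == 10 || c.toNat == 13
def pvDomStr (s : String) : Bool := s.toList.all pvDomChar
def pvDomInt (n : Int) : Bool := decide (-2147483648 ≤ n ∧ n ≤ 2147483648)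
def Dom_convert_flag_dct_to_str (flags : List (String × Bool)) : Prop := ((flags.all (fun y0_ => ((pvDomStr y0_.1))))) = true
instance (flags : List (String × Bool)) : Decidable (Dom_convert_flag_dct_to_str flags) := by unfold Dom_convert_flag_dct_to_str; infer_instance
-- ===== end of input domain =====

-- B replaces A's interleaved reset-counter loop by a two-pass build-then-chunk traversal (alternative decomposition, same cost).

-- ===== PORT A =====
-- temp = "%s=%s" % (key, "T" if value else "F"); temp += (11 - len(temp)) * ' '   (Nat subtraction = Python's negative-repeat → '')
def pvFmtA (kv : String × Bool) : List Char :=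
  let temp := kv.1.toList ++ ['='] ++ [if kv.2 then 'T' else 'F']
  temp ++ List.replicate (11 - temp.length) ' '

-- the loop body over state (flag_per_line_count, flag_str)
def pvStepA (st : Nat × List Char) (kv : String × Bool) : Nat × List Char :=
  let temp := pvFmtA kv
  if st.1 < 6 then (st.1 + 1, st.2 ++ temp)
  else (1, st.2 ++ temp ++ ['\n', ' ', ' '])

def convert_flag_dct_to_str (flags : List (String × Bool)) : String :=
  let r := flags.foldl pvStepA (1, [' ', ' '])
  String.ofList (r.2 ++ ['\n', ' ', ' ', '/'])

-- ===== PORT B =====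
def pvFmtB (kv : String × Bool) : List Char :=
  let temp := kv.1.toList ++ ['='] ++ [if kv.2 then 'T' else 'F']
  temp ++ List.replicate (11 - temp.length) ' '

-- for i in range(0, len(pieces), 6): chunk = pieces[i:i+6]; out += ''.join(chunk); if len(chunk)==6: out += '\n  '
def pvChunks6 : List (List Char) → List Char
  | [] => []
  | p :: ps =>
      let chunk := (p :: ps).take 6
      chunk.flatten ++ (if chunk.length = 6 then ['\n', ' ', ' '] else []) ++ pvChunks6 ((p :: ps).drop 6)
  termination_by l => l.length
  decreasing_by simp

def convert_flag_dct_to_str_alt (flags : List (String × Bool)) : String :=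
  let pieces := flags.map pvFmtB
  String.ofList ([' ', ' '] ++ pvChunks6 pieces ++ ['\n', ' ', ' ', '/'])

-- ===== PRECONDITION & SPEC =====
def Spec_convert_flag_dct_to_str (flags : List (String × Bool)) (out : String) : Prop := out = convert_flag_dct_to_str_alt flags
instance (flags : List (String × Bool)) (out : String) : Decidable (Spec_convert_flag_dct_to_str flags out) := by unfold Spec_convert_flag_dct_to_str; infer_instance

-- ===== CLAIM (what is proved, stated in full; the proofs are below) =====
def Claim_equal_convert_flag_dct_to_str : Prop := ∀ (flags : List (String × Bool)), Dom_convert_flag_dct_to_str flags → Spec_convert_flag_dct_to_str flags (convert_flag_dct_to_str flags)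

-- ===== LEMMAS AND PROOFS =====

-- counter-view of B's chunking: g c ps emits ps as columns, the next one being the c-th on its line
def pvG : Nat → List (List Char) → List Char
  | _, [] => []
  | c, p :: ps => if c < 6 then p ++ pvG (c + 1) ps else p ++ ['\n', ' ', ' '] ++ pvG 1 ps

lemma foldl_stepA_eq_g (l : List (String × Bool)) : ∀ (c : Nat) (acc : List Char),
    (l.foldl pvStepA (c, acc)).2 = acc ++ pvG c (l.map pvFmtA) := by
  induction l with
  | nil => intro c acc; simp [pvG]
  | cons kv l ih =>
      intro c acc
      by_cases h : c < 6 <;>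
        simp [pvStepA, pvG, h, ih, List.append_assoc]

lemma pvChunks6_nil : pvChunks6 [] = [] := by rw [pvChunks6]

lemma pvChunks6_cons (p : List Char) (ps : List (List Char)) :
    pvChunks6 (p :: ps) = ((p :: ps).take 6).flatten ++
      (if ((p :: ps).take 6).length = 6 then ['\n', ' ', ' '] else []) ++ pvChunks6 ((p :: ps).drop 6) := by
  rw [pvChunks6]

lemma g_one_eq_chunks6 : ∀ (n : Nat) (ps : List (List Char)), ps.length ≤ n → pvG 1 ps = pvChunks6 ps := by
  intro n
  induction n with
  | zero =>
      intro ps h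
      have : ps = [] := List.eq_nil_of_length_eq_zero (Nat.le_zero.mp h)
      subst this; simp [pvG, pvChunks6_nil]
  | succ n ih =>
      intro ps h
      match ps with
      | [] => simp [pvG, pvChunks6_nil]
      | [a] => simp [pvG, pvChunks6_nil, pvChunks6_cons]
      | [a, b] => simp [pvG, pvChunks6_nil, pvChunks6_cons]
      | [a, b, c] => simp [pvG, pvChunks6_nil, pvChunks6_cons]
      | [a, b, c, d] => simp [pvG, pvChunks6_nil, pvChunks6_cons]
      | [a, b, c, d, e] => simp [pvG, pvChunks6_nil, pvChunks6_cons]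
      | a :: b :: c :: d :: e :: f :: rest =>
          have hr : rest.length ≤ n := by simp at h; omega
          simp [pvG, pvChunks6_cons, ih rest hr, List.append_assoc]

lemma fmtA_eq_fmtB : pvFmtA = pvFmtB := rfl

-- ===== VERDICT (by name: the statement is the Claim_ definition above) =====
theorem convert_flag_dct_to_str_spec : Claim_equal_convert_flag_dct_to_str := by
  intro flags _
  show convert_flag_dct_to_str flags = convert_flag_dct_to_str_alt flags
  simp only [convert_flag_dct_to_str, convert_flag_dct_to_str_alt]
  rw [foldl_stepA_eq_g, g_one_eq_chunks6 (flags.map pvFmtA).length _ le_rfl, fmtA_eq_fmtB]
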